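-- pv_equiv track=rewrite | github.com/francescacairoli/CQR_Quantitative_NPM | gene_regulation_utils.py | get_property
-- ===== SOURCE A (Python) =====
-- def get_genespec_property(gene_idx, T, bound):
-- 	prop = f'(G_[{T/2},{T}](X{gene_idx}<={bound[gene_idx][1]/2}))'
-- 	return prop
--
-- def get_property(nb_genes, T, bound):
--
-- 	parts = []
-- 	for i in range(nb_genes):
-- 		#parts.append(f'( F_[0,{T}](G_[0,{T}](X{i}<={bound[i][1]})) )')
-- 		parts.append(get_genespec_property(i, T, bound))
--
-- 	if nb_genes == 2:
-- 		bound_property = '(' + parts[0]+ ' & ' + parts[1] + ')'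
-- 	elif nb_genes == 4:
-- 		bound_property = '( (' + parts[0]+ ' & ' + parts[1] + ') & (' + parts[2]+ ' & ' + parts[3] + ') )'
-- 	elif nb_genes == 8:
-- 		bound_property = '( ( (' + parts[0]+ ' & ' + parts[1] + ') & (' + parts[2]+ ' & ' + parts[3] + ') ) & ( (' + parts[4]+ ' & ' + parts[5] + ') & (' + parts[6]+ ' & ' + parts[7] + ') ) )'
-- 	else:
-- 		bound_property = ''
--
-- 	return bound_property
-- ===== SOURCE B (Python) =====
-- def get_genespec_property(gene_idx, T, bound):
-- 	prop = f'(G_[{T/2},{T}](X{gene_idx}<={bound[gene_idx][1]/2}))'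
-- 	return prop
--
-- def get_property(nb_genes, T, bound):
-- 	# bottom-up balanced pair reduction instead of three unrolled templates
-- 	level = [get_genespec_property(i, T, bound) for i in range(nb_genes)]
-- 	if nb_genes not in (2, 4, 8):
-- 		return ''
-- 	first = True
-- 	while len(level) > 1:
-- 		if first:
-- 			level = ['(' + level[j] + ' & ' + level[j + 1] + ')' for j in range(0, len(level), 2)]
-- 		else:
-- 			level = ['( ' + level[j] + ' & ' + level[j + 1] + ' )' for j in range(0, len(level), 2)]
-- 		first = False
-- 	return level[0]
-- ===== Notes on version B (the rewrite author's own statement) =====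
-- stated objective: alternative
-- what changed: Replaces the three unrolled literal templates (for 2, 4 and 8 genes) by a single data-driven bottom-up pair reduction over the list of per-gene substrings, with the first combining pass spaceless and later passes spaced, matching A byte-for-byte.
import Mathlib
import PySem

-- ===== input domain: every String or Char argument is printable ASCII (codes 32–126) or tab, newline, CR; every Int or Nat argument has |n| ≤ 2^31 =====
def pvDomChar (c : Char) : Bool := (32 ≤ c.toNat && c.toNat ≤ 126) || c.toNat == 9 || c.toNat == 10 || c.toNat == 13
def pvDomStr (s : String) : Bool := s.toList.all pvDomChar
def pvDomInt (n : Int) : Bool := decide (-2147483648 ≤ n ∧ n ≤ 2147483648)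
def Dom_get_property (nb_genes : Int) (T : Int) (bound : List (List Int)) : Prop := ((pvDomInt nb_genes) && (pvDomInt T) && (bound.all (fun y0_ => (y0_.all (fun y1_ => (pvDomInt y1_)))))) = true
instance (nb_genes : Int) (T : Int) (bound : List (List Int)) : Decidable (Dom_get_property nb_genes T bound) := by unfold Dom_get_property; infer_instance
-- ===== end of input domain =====

-- B rewrites A's three unrolled templates as one bottom-up pair reduction; same output byte-for-byte (objective: alternative).

-- ===== PORT A =====
-- exact repr of the Python float n/2 for an int n with |n| <= 2^31 (n/2 is exactly representable; repr is 'k.0' or 'k.5')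
def pyHalfStr (n : Int) : String :=
  (if n < 0 then "-" else "") ++ PySem.Int.toStr ((n.natAbs / 2 : Nat) : Int) ++ (if n.natAbs % 2 = 0 then ".0" else ".5")

def get_genespec_property (gene_idx : Int) (T : Int) (bound : List (List Int)) : String :=
  "(G_[" ++ pyHalfStr T ++ "," ++ PySem.Int.toStr T ++ "](X" ++ PySem.Int.toStr gene_idx
    ++ "<=" ++ pyHalfStr (PySem.List.pyGetD (PySem.List.pyGetD bound gene_idx []) 1 0) ++ "))"

def get_property (nb_genes : Int) (T : Int) (bound : List (List Int)) : String :=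
  let parts := (PySem.List.pyRange 0 nb_genes 1).map (fun i => get_genespec_property i T bound)
  if nb_genes = 2 then
    "(" ++ PySem.List.pyGetD parts 0 "" ++ " & " ++ PySem.List.pyGetD parts 1 "" ++ ")"
  else if nb_genes = 4 then
    "( (" ++ PySem.List.pyGetD parts 0 "" ++ " & " ++ PySem.List.pyGetD parts 1 "" ++ ") & ("
      ++ PySem.List.pyGetD parts 2 "" ++ " & " ++ PySem.List.pyGetD parts 3 "" ++ ") )"
  else if nb_genes = 8 then
    "( ( (" ++ PySem.List.pyGetD parts 0 "" ++ " & " ++ PySem.List.pyGetD parts 1 "" ++ ") & ("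
      ++ PySem.List.pyGetD parts 2 "" ++ " & " ++ PySem.List.pyGetD parts 3 "" ++ ") ) & ( ("
      ++ PySem.List.pyGetD parts 4 "" ++ " & " ++ PySem.List.pyGetD parts 5 "" ++ ") & ("
      ++ PySem.List.pyGetD parts 6 "" ++ " & " ++ PySem.List.pyGetD parts 7 "" ++ ") ) )"
  else ""

-- ===== PORT B =====
-- one combining pass: adjacent pairs, spaceless on the first pass, spaced afterwards
def combineLevel (first : Bool) : List String -> List String
  | a :: b :: rest =>
      (if first then "(" ++ a ++ " & " ++ b ++ ")" else "( " ++ a ++ " & " ++ b ++ " )")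
        :: combineLevel first rest
  | _ => []

theorem combineLevel_len (first : Bool) : ∀ (l : List String), 2 * (combineLevel first l).length ≤ l.length
  | [] => by simp [combineLevel]
  | [a] => by simp [combineLevel]
  | a :: b :: rest => by
      simp only [combineLevel, List.length_cons]
      have := combineLevel_len first rest
      omega

theorem combineLevel_length_lt (first : Bool) (l : List String) (h : 1 < l.length) :
    (combineLevel first l).length < l.length := by
  have := combineLevel_len first l
  omega

def reduceLoop (level : List String) (first : Bool) : String :=
  if h : 1 < level.length then reduceLoop (combineLevel first level) false
  else level.headD ""
termination_by level.length
decreasing_by exact combineLevel_length_lt first level h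

def get_property_alt (nb_genes : Int) (T : Int) (bound : List (List Int)) : String :=
  let level := (PySem.List.pyRange 0 nb_genes 1).map (fun i => get_genespec_property i T bound)
  if nb_genes = 2 ∨ nb_genes = 4 ∨ nb_genes = 8 then reduceLoop level true else ""

-- ===== PRECONDITION & SPEC =====
-- Pre_ excludes only the inputs on which A raises an IndexError: 0 < nb_genes but bound has
-- fewer than nb_genes rows, or some of the first nb_genes rows has fewer than 2 entries.
def Pre_get_property (nb_genes : Int) (T : Int) (bound : List (List Int)) : Prop :=
  0 < nb_genes → (nb_genes.toNat ≤ bound.length ∧ ∀ row ∈ bound.take nb_genes.toNat, 2 ≤ row.length)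
instance (nb_genes : Int) (T : Int) (bound : List (List Int)) : Decidable (Pre_get_property nb_genes T bound) := by unfold Pre_get_property; infer_instance
def pvWitness_get_property : Int × Int × List (List Int) := (2, 7, [[1, 3], [2, -5]])

def Spec_get_property (nb_genes : Int) (T : Int) (bound : List (List Int)) (out : String) : Prop := out = get_property_alt nb_genes T bound
instance (nb_genes : Int) (T : Int) (bound : List (List Int)) (out : String) : Decidable (Spec_get_property nb_genes T bound out) := by unfold Spec_get_property; infer_instance

-- ===== CLAIM (what is proved, stated in full; the proofs are below) =====
def Claim_equal_get_property : Prop := ∀ (nb_genes : Int) (T : Int) (bound : List (List Int)), Dom_get_property nb_genes T bound → Pre_get_property nb_genes T bound → Spec_get_property nb_genes T bound (get_property nb_genes T bound)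

-- ===== LEMMAS AND PROOFS =====
theorem reduceLoop_step (level : List String) (first : Bool) (h : 1 < level.length) :
    reduceLoop level first = reduceLoop (combineLevel first level) false := by
  rw [reduceLoop, dif_pos h]

theorem reduceLoop_one (a : String) (first : Bool) : reduceLoop [a] first = a := by
  rw [reduceLoop, dif_neg (by simp)]
  rfl

theorem reduceLoop_two (a b : String) :
    reduceLoop [a, b] true = "(" ++ a ++ " & " ++ b ++ ")" := by
  rw [reduceLoop_step _ _ (by simp)]
  simp only [combineLevel]
  rw [reduceLoop_one]
  simp

theorem reduceLoop_four (a b c d : String) :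
    reduceLoop [a, b, c, d] true =
      "( (" ++ a ++ " & " ++ b ++ ") & (" ++ c ++ " & " ++ d ++ ") )" := by
  rw [reduceLoop_step _ _ (by simp)]
  simp only [combineLevel]
  rw [reduceLoop_step _ _ (by simp)]
  simp only [combineLevel]
  rw [reduceLoop_one]
  apply String.toList_injective
  simp [String.toList_append]

theorem reduceLoop_eight (a b c d e f g h : String) :
    reduceLoop [a, b, c, d, e, f, g, h] true =
      "( ( (" ++ a ++ " & " ++ b ++ ") & (" ++ c ++ " & " ++ d ++ ") ) & ( ("
        ++ e ++ " & " ++ f ++ ") & (" ++ g ++ " & " ++ h ++ ") ) )" := by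
  rw [reduceLoop_step _ _ (by simp)]
  simp only [combineLevel]
  rw [reduceLoop_step _ _ (by simp)]
  simp only [combineLevel]
  rw [reduceLoop_step _ _ (by simp)]
  simp only [combineLevel]
  rw [reduceLoop_one]
  apply String.toList_injective
  simp [String.toList_append]

-- ===== VERDICT (by name: the statement is the Claim_ definition above) =====
theorem get_property_spec : Claim_equal_get_property := by
  intro nb_genes T bound _ _
  unfold Spec_get_property get_property get_property_alt
  by_cases h2 : nb_genes = 2
  · subst h2
    have hr : PySem.List.pyRange 0 2 1 = [0, 1] := by decide
    simp [hr, reduceLoop_two, PySem.List.pyGetD]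
  · by_cases h4 : nb_genes = 4
    · subst h4
      have hr : PySem.List.pyRange 0 4 1 = [0, 1, 2, 3] := by decide
      simp [hr, reduceLoop_four, PySem.List.pyGetD]
    · by_cases h8 : nb_genes = 8
      · subst h8
        have hr : PySem.List.pyRange 0 8 1 = [0, 1, 2, 3, 4, 5, 6, 7] := by decide
        simp [hr, reduceLoop_eight, PySem.List.pyGetD]
      · simp [h2, h4, h8]
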